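-- pv_equiv track=rewrite | github.com/ManiaciaChao/lab-ml | lab2/test.py | bow_gen
-- ===== SOURCE A (Python) =====
-- def bow_gen(words, input):
--     bow = {}
--     for word in input:
--         if word in words:
--             if word in bow:
--                 bow[word] += 1
--             else:
--                 bow[word] = 1
--     return bow
-- ===== SOURCE B (Python) =====
-- def bow_gen(words, input):
--     # Phase 1: count every word's occurrences, first-appearance order.
--     freq = {}
--     for word in input:
--         freq[word] = freq.get(word, 0) + 1
--     # Phase 2: keep only vocabulary words.
--     bow = {}
--     for word, n in freq.items():
--         if word in words:
--             bow[word] = n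
--     return bow
-- ===== Notes on version B (the rewrite author's own statement) =====
-- stated objective: alternative
-- what changed: A filters by the vocabulary while counting in one pass; B first counts all words into a frequency dict, then filters that table by the vocabulary in a second pass, doing one vocabulary membership test per distinct word instead of per occurrence.
import Mathlib
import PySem

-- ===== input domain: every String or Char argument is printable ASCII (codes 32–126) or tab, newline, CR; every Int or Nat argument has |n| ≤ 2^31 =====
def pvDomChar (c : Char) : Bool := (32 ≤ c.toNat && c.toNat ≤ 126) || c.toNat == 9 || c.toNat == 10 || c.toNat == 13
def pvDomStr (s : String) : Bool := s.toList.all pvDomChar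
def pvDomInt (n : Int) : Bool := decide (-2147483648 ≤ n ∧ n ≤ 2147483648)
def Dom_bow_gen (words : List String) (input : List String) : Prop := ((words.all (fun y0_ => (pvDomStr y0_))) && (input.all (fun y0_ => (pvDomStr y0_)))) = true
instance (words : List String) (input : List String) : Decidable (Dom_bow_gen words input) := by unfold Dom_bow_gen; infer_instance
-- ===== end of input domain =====

-- B replaces A's single filter-then-count pass by two passes: count ALL words first, then
-- filter the frequency table by the vocabulary (alternative decomposition, same result).

-- ===== PORT A =====
-- A: one pass over input; only vocabulary words are counted, dict updated in place.
def bow_gen (words : List String) (input : List String) : List (String × Int) :=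
  (input.foldl (fun bow word =>
      if words.contains word then
        if bow.contains word then bow.insert word (bow.getD word 0 + 1)
        else bow.insert word 1
      else bow) PySem.Dict.empty).items

-- ===== PORT B =====
-- B: phase 1 counts every word (freq[word] = freq.get(word, 0) + 1); phase 2 filters freq by the vocabulary.
def bow_gen_alt (words : List String) (input : List String) : List (String × Int) :=
  let freq : PySem.Dict String Int :=
    input.foldl (fun d word => d.insert word (d.getD word 0 + 1)) PySem.Dict.empty
  let bow : PySem.Dict String Int :=
    freq.items.foldl (fun d p => if words.contains p.1 then d.insert p.1 p.2 else d)
      PySem.Dict.empty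
  bow.items

-- ===== PRECONDITION & SPEC =====
def Spec_bow_gen (words : List String) (input : List String) (out : List (String × Int)) : Prop := out = bow_gen_alt words input
instance (words : List String) (input : List String) (out : List (String × Int)) : Decidable (Spec_bow_gen words input out) := by unfold Spec_bow_gen; infer_instance

-- ===== CLAIM (what is proved, stated in full; the proofs are below) =====
def Claim_equal_bow_gen : Prop := ∀ (words : List String) (input : List String), Dom_bow_gen words input → Spec_bow_gen words input (bow_gen words input)

-- ===== LEMMAS AND PROOFS =====

-- Set.ofList commutes with filter (first-occurrence dedup of a filtered list).
theorem set_foldl_add_filter (p : String → Bool) (xs s : List String) :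
    (xs.filter p).foldl PySem.Set.add (s.filter p) = (xs.foldl PySem.Set.add s).filter p := by
  induction xs generalizing s with
  | nil => rfl
  | cons x xs ih =>
    by_cases hp : p x = true
    · simp only [List.filter_cons, hp, if_true, List.foldl_cons]
      have hadd : PySem.Set.add (s.filter p) x = (PySem.Set.add s x).filter p := by
        simp only [PySem.Set.add, PySem.Set.contains]
        by_cases hm : x ∈ s
        · simp [hm, hp]
        · simp [hm, hp, List.filter_append]
      rw [hadd, ih]
    · simp only [List.filter_cons, hp, Bool.false_eq_true, if_false, List.foldl_cons]
      have hadd : s.filter p = (PySem.Set.add s x).filter p := by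
        simp only [PySem.Set.add, PySem.Set.contains]
        by_cases hm : x ∈ s
        · simp [hm]
        · simp [hm, List.filter_append, hp]
      rw [hadd, ih]

theorem set_ofList_filter (p : String → Bool) (xs : List String) :
    PySem.Set.ofList (xs.filter p) = (PySem.Set.ofList xs).filter p := by
  simpa using set_foldl_add_filter p xs []

-- A's result in closed form: counter of the vocabulary-filtered input.
theorem bow_gen_eq (words input : List String) :
    bow_gen words input
      = (PySem.Set.ofList (input.filter (fun w => words.contains w))).map
          (fun k => (k, ((input.filter (fun w => words.contains w)).count k : Int))) := by
  unfold bow_gen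
  rw [← List.foldl_filter]
  have hfun : (fun (bow : PySem.Dict String Int) (word : String) =>
        if bow.contains word then bow.insert word (bow.getD word 0 + 1)
        else bow.insert word 1)
      = fun (bow : PySem.Dict String Int) (word : String) =>
        bow.insert word (bow.getD word 0 + 1) := by
    funext bow word
    by_cases hc : bow.contains word = true
    · simp [hc]
    · simp only [hc, Bool.false_eq_true, if_false]
      rw [PySem.Dict.getD_of_not_contains bow (0 : Int) (by simpa using hc)]
      norm_num
  rw [hfun, PySem.Dict.foldl_insert_getD_add_one_eq_counter, PySem.Dict.items_counter]

-- B's result in closed form: the full-input counter's items, filtered by the vocabulary.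
theorem bow_gen_alt_eq (words input : List String) :
    bow_gen_alt words input
      = ((PySem.Set.ofList input).filter (fun k => words.contains k)).map
          (fun k => (k, (input.count k : Int))) := by
  unfold bow_gen_alt
  simp only [PySem.Dict.foldl_insert_getD_add_one_eq_counter, PySem.Dict.items_counter]
  rw [← List.foldl_filter, List.filter_map]
  simp only [Function.comp_def]
  have hkeys : (((PySem.Set.ofList input).filter (fun k => words.contains k)).map
      (fun k => (k, (input.count k : Int)))).map Prod.fst
      = (PySem.Set.ofList input).filter (fun k => words.contains k) := by
    simp [Function.comp_def]
  have hfresh := PySem.Dict.items_foldl_insert_fresh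
      (l := ((PySem.Set.ofList input).filter (fun k => words.contains k)).map
        (fun k => (k, (input.count k : Int))))
      (k := Prod.fst) (v := Prod.snd) (d := (PySem.Dict.empty : PySem.Dict String Int))
      (by intro a _; simp)
      (by rw [hkeys]; exact (PySem.Set.nodup_ofList input).filter _)
  rw [hfresh]
  simp [Function.comp_def]
  rfl

-- ===== VERDICT (by name: the statement is the Claim_ definition above) =====
theorem bow_gen_spec : Claim_equal_bow_gen := by
  intro words input _
  unfold Spec_bow_gen
  rw [bow_gen_eq, bow_gen_alt_eq, set_ofList_filter]
  apply List.map_congr_left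
  intro k hk
  have hpk : decide (k ∈ words) = true := by
    simpa using (List.mem_filter.mp hk).2
  simp [List.count_filter, hpk]
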